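-- pv_equiv track=rewrite | github.com/WenKang689/Flaskapp | test.py | categorize_software
-- ===== SOURCE A (Python) =====
-- def categorize_software(software_list):
--     categories = {
--         "Games": ["Steam", "Epic Games", "Ubisoft", "Riot Games", "Battle.net", "GOG Galaxy", "Rockstar Games Launcher", "PlayStation Now"],
--         "Programming Tools": ["Visual Studio", "PyCharm", "Sublime", "Eclipse", "IntelliJ", "NetBeans"],
--         "Office Use Tools": ["Microsoft Office", "LibreOffice", "Google Docs", "Slack", "Zoom"],
--         "Other": []
--     }
--
--     category_counts = {category: 0 for category in categories}
--
--     for software in software_list: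
--         categorized = False
--         for category, keywords in categories.items():
--             if any(keyword in software for keyword in keywords):
--                 category_counts[category] += 1
--                 categorized = True
--                 break
--         if not categorized:
--             category_counts["Other"] += 1
--
--     return category_counts
-- ===== SOURCE B (Python) =====
-- def categorize_software(software_list):
--     # Staged counting: one whole-list counting pass per category, in priority
--     # order with exclusion predicates (an item counts as Games if it matches a
--     # Games keyword; as Programming only if it didn't match Games; etc.), and
--     # "Other" by subtraction. No per-item dict mutation, no first-match scan.
--     games = ["Steam", "Epic Games", "Ubisoft", "Riot Games", "Battle.net",
--              "GOG Galaxy", "Rockstar Games Launcher", "PlayStation Now"]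
--     prog = ["Visual Studio", "PyCharm", "Sublime", "Eclipse", "IntelliJ", "NetBeans"]
--     office = ["Microsoft Office", "LibreOffice", "Google Docs", "Slack", "Zoom"]
--
--     def hits(kws, s):
--         return any(k in s for k in kws)
--
--     g = sum(1 for s in software_list if hits(games, s))
--     p = sum(1 for s in software_list if not hits(games, s) and hits(prog, s))
--     o = sum(1 for s in software_list
--             if not hits(games, s) and not hits(prog, s) and hits(office, s))
--     return {"Games": g, "Programming Tools": p, "Office Use Tools": o,
--             "Other": len(software_list) - g - p - o}
-- ===== Notes on version B (the rewrite author's own statement) =====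
-- stated objective: alternative
-- what changed: Replaces A's per-item first-match scan with per-item dict increments by three whole-list counting passes (one per category, in priority order with exclusion predicates) and computes 'Other' by subtraction from the list length.
import Mathlib
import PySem

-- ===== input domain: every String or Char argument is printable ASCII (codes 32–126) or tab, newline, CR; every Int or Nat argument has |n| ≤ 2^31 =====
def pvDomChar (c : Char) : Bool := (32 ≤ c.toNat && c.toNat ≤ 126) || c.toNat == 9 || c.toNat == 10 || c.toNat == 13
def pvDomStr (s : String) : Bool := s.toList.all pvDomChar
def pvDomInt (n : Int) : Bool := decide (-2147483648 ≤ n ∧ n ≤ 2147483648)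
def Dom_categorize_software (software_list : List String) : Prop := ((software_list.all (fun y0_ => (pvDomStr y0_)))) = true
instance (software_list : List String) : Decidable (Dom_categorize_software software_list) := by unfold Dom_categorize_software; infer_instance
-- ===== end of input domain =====

-- B replaces A's per-item first-match scan with dict increments by three whole-list counting
-- passes (priority order via exclusion predicates) and 'Other' by subtraction; objective: alternative.

-- ===== PORT A =====
def pvCategoriesA : List (String × List String) :=
  [("Games", ["Steam", "Epic Games", "Ubisoft", "Riot Games", "Battle.net", "GOG Galaxy", "Rockstar Games Launcher", "PlayStation Now"]),
   ("Programming Tools", ["Visual Studio", "PyCharm", "Sublime", "Eclipse", "IntelliJ", "NetBeans"]),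
   ("Office Use Tools", ["Microsoft Office", "LibreOffice", "Google Docs", "Slack", "Zoom"]),
   ("Other", [])]

-- inner 'for category, keywords in categories.items(): … break' with the 'categorized' flag as the Bool
def pvInnerA (software : String) (counts : PySem.Dict String Int) :
    List (String × List String) → PySem.Dict String Int × Bool
  | [] => (counts, false)
  | (category, keywords) :: rest =>
    if keywords.any (fun keyword => PySem.Str.isIn keyword software) then
      (counts.modify category 0 (· + 1), true)
    else pvInnerA software counts rest

def categorize_software (software_list : List String) : List (String × Int) :=
  let categories := PySem.Dict.ofList pvCategoriesA
  let category_counts : PySem.Dict String Int :=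
    categories.keys.foldl (fun d category => d.insert category 0) PySem.Dict.empty
  (software_list.foldl
    (fun counts software =>
      let r := pvInnerA software counts categories.items
      if r.2 then r.1 else r.1.modify "Other" 0 (· + 1))
    category_counts).items

-- ===== PORT B =====
def pvGamesKws : List String :=
  ["Steam", "Epic Games", "Ubisoft", "Riot Games", "Battle.net", "GOG Galaxy", "Rockstar Games Launcher", "PlayStation Now"]
def pvProgKws : List String :=
  ["Visual Studio", "PyCharm", "Sublime", "Eclipse", "IntelliJ", "NetBeans"]
def pvOfficeKws : List String :=
  ["Microsoft Office", "LibreOffice", "Google Docs", "Slack", "Zoom"]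

-- hits(kws, s) = any(k in s for k in kws)
def pvHits (kws : List String) (s : String) : Bool :=
  kws.any (fun k => PySem.Str.isIn k s)

-- sum(1 for s in l if …) = count of the elements satisfying the predicate
def categorize_software_alt (software_list : List String) : List (String × Int) :=
  let g : Int := (software_list.countP (fun s => pvHits pvGamesKws s) : Nat)
  let p : Int := (software_list.countP (fun s => !pvHits pvGamesKws s && pvHits pvProgKws s) : Nat)
  let o : Int := (software_list.countP
      (fun s => !pvHits pvGamesKws s && !pvHits pvProgKws s && pvHits pvOfficeKws s) : Nat)
  [("Games", g), ("Programming Tools", p), ("Office Use Tools", o),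
   ("Other", (software_list.length : Int) - g - p - o)]

-- ===== PRECONDITION & SPEC =====
def Spec_categorize_software (software_list : List String) (out : List (String × Int)) : Prop := out = categorize_software_alt software_list
instance (software_list : List String) (out : List (String × Int)) : Decidable (Spec_categorize_software software_list out) := by unfold Spec_categorize_software; infer_instance

-- ===== CLAIM =====
def Claim_equal_categorize_software : Prop := ∀ (software_list : List String), Dom_categorize_software software_list → Spec_categorize_software software_list (categorize_software software_list)

-- ===== LEMMAS AND PROOFS =====

-- the concrete 4-entry counts dict A's loop maintains
def pvD (g p o x : Int) : PySem.Dict String Int :=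
  PySem.Dict.ofList [("Games", g), ("Programming Tools", p), ("Office Use Tools", o), ("Other", x)]

-- A's loop body on the concrete dict, by cases on the three priority tests
theorem pvStepA (s : String) (g p o x : Int) :
    (let r := pvInnerA s (pvD g p o x) (PySem.Dict.ofList pvCategoriesA).items
     if r.2 then r.1 else r.1.modify "Other" 0 (· + 1))
      = if pvHits pvGamesKws s then pvD (g + 1) p o x
        else if pvHits pvProgKws s then pvD g (p + 1) o x
        else if pvHits pvOfficeKws s then pvD g p (o + 1) x
        else pvD g p o (x + 1) := by
  have hitems : (PySem.Dict.ofList pvCategoriesA).items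
      = [("Games", pvGamesKws), ("Programming Tools", pvProgKws),
         ("Office Use Tools", pvOfficeKws), ("Other", [])] := rfl
  have eG : pvGamesKws.any (fun keyword => PySem.Str.isIn keyword s) = pvHits pvGamesKws s := rfl
  have eP : pvProgKws.any (fun keyword => PySem.Str.isIn keyword s) = pvHits pvProgKws s := rfl
  have eO : pvOfficeKws.any (fun keyword => PySem.Str.isIn keyword s) = pvHits pvOfficeKws s := rfl
  have mG : (pvD g p o x).modify "Games" 0 (· + 1) = pvD (g + 1) p o x := rfl
  have mP : (pvD g p o x).modify "Programming Tools" 0 (· + 1) = pvD g (p + 1) o x := rfl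
  have mO : (pvD g p o x).modify "Office Use Tools" 0 (· + 1) = pvD g p (o + 1) x := rfl
  have mX : (pvD g p o x).modify "Other" 0 (· + 1) = pvD g p o (x + 1) := rfl
  rw [hitems]
  simp only [pvInnerA, List.any_nil, eG, eP, eO]
  by_cases hG : pvHits pvGamesKws s <;>
    by_cases hP : pvHits pvProgKws s <;>
      by_cases hO : pvHits pvOfficeKws s <;>
        simp [hG, hP, hO, mG, mP, mO, mX]

-- loop invariant: A's fold from any concrete counts dict adds B's staged counts
theorem pvFoldA (l : List String) (g p o x : Int) :
    (l.foldl
      (fun counts software =>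
        let r := pvInnerA software counts (PySem.Dict.ofList pvCategoriesA).items
        if r.2 then r.1 else r.1.modify "Other" 0 (· + 1))
      (pvD g p o x)).items
    = [("Games", g + (l.countP (fun s => pvHits pvGamesKws s) : Nat)),
       ("Programming Tools", p + (l.countP (fun s => !pvHits pvGamesKws s && pvHits pvProgKws s) : Nat)),
       ("Office Use Tools", o + (l.countP (fun s => !pvHits pvGamesKws s && !pvHits pvProgKws s && pvHits pvOfficeKws s) : Nat)),
       ("Other", x + ((l.length : Int)
          - (l.countP (fun s => pvHits pvGamesKws s) : Nat)
          - (l.countP (fun s => !pvHits pvGamesKws s && pvHits pvProgKws s) : Nat)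
          - (l.countP (fun s => !pvHits pvGamesKws s && !pvHits pvProgKws s && pvHits pvOfficeKws s) : Nat)))] := by
  induction l generalizing g p o x with
  | nil =>
    simp only [List.foldl_nil, List.countP_nil, List.length_nil, Nat.cast_zero, add_zero, sub_zero]
    rfl
  | cons s t ih =>
    rw [List.foldl_cons, pvStepA]
    by_cases hG : pvHits pvGamesKws s <;>
      by_cases hP : pvHits pvProgKws s <;>
        by_cases hO : pvHits pvOfficeKws s <;>
          · simp only [hG, hP, hO, if_true, if_false, Bool.false_eq_true]
            rw [ih]
            simp only [List.countP_cons, List.length_cons, hG, hP, hO, Bool.not_true,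
              Bool.not_false, Bool.and_false, Bool.and_true, List.cons.injEq, Prod.mk.injEq, and_true, true_and]
            refine ⟨by push_cast; ring, by push_cast; ring, by push_cast; ring, by push_cast; ring⟩

-- A's initial counts dict is pvD 0 0 0 0
theorem pvInitA :
    (PySem.Dict.ofList pvCategoriesA).keys.foldl (fun d category => d.insert category 0)
        (PySem.Dict.empty : PySem.Dict String Int) = pvD 0 0 0 0 := by
  rfl

-- ===== VERDICT =====
theorem categorize_software_spec : Claim_equal_categorize_software := by
  intro software_list _
  unfold Spec_categorize_software
  simp only [categorize_software, categorize_software_alt]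
  rw [pvInitA, pvFoldA]
  simp
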